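-- pv_equiv track=rewrite | github.com/adomas-vensas/Coding-Theory-Lab | utilities.py | multiply_vector_with_matrix
-- ===== SOURCE A (Python) =====
-- def multiply_vector_with_matrix(A:list, B:list[list], F_q:list) -> list:
--     if len(A) != len(B):
--         raise ValueError("Number of columns in A must be equal to the number of rows in B.")
--
--     result = [0] * len(B[0])
--
--     # Perform the multiplication
--     for j in range(len(B[0])):  # Loop through the columns of the matrix
--         for i in range(len(A)):  # Loop through the elements of the vector
--             result[j] += A[i] * B[i][j]
--
--         result[j] = result[j] % len(F_q)
--
--     return result
-- ===== SOURCE B (Python) =====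
-- def multiply_vector_with_matrix(A: list, B: list[list], F_q: list) -> list:
--     if len(A) != len(B):
--         raise ValueError("Number of columns in A must be equal to the number of rows in B.")
--     acc = [0] * len(B[0])
--     for a, row in zip(A, B):
--         acc = [x + a * y for x, y in zip(acc, row)]
--     q = len(F_q)
--     return [x % q for x in acc]
-- ===== Notes on version B (the rewrite author's own statement) =====
-- stated objective: alternative
-- what changed: B accumulates a linear combination of scaled matrix rows in one pass over A (pointwise vector additions via zip) and applies the modulus in a final map, instead of A's column-major nested loops computing each output entry as its own dot product with in-place index updates.
import Mathlib
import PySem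

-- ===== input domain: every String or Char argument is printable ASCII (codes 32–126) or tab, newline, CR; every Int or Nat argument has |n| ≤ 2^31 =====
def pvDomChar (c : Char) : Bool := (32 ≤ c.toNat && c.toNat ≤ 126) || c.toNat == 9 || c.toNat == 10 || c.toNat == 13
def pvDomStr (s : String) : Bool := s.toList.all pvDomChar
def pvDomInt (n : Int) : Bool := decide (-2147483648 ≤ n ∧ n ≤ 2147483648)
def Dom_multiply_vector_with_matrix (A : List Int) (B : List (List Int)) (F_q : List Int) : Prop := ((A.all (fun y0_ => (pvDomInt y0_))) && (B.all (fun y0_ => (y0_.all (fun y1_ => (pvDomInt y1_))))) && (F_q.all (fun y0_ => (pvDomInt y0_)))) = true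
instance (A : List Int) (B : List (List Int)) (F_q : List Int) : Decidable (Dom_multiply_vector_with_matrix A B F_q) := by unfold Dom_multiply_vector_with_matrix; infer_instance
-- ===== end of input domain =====

-- B accumulates scaled rows of the matrix in one pass over A (pointwise zip additions),
-- applying the modulus once at the end, instead of A's column-major nested dot products.

-- ===== PORT A =====
def multiply_vector_with_matrix (A : List Int) (B : List (List Int)) (F_q : List Int) : List Int :=
  if A.length ≠ B.length then []  -- Python raises ValueError here; excluded by Pre_
  else
    -- B[0]: raises IndexError when B = []; excluded by Pre_
    let n := (B.headD []).length
    let result := List.replicate n (0 : Int)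
    (PySem.List.pyRange 0 (n : Int) 1).foldl (fun result j =>
      let rj := (PySem.List.pyRange 0 (A.length : Int) 1).foldl
        (fun acc i => acc + PySem.List.pyGetD A i 0 * PySem.List.pyGetD (PySem.List.pyGetD B i []) j 0)
        (PySem.List.pyGetD result j 0)
      PySem.List.pySetD result j (PySem.Int.mod rj (F_q.length : Int))) result

-- ===== PORT B =====
def multiply_vector_with_matrix_alt (A : List Int) (B : List (List Int)) (F_q : List Int) : List Int :=
  if A.length ≠ B.length then []  -- Python raises ValueError here; excluded by Pre_
  else
    let acc := (A.zip B).foldl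
      (fun acc p => (acc.zip p.2).map (fun q => q.1 + p.1 * q.2))
      (List.replicate (B.headD []).length (0 : Int))
    acc.map (fun x => PySem.Int.mod x (F_q.length : Int))

-- ===== PRECONDITION & SPEC =====
-- Pre_ excludes exactly the inputs where A raises: len(A) != len(B) (ValueError),
-- B = [] (IndexError on B[0]), any row of B shorter than B[0] (IndexError on B[i][j]),
-- and F_q = [] when B[0] is nonempty (ZeroDivisionError on %; with B[0] = [] the loop
-- body never runs, so an empty F_q is harmless and stays inside Pre_).
def Pre_multiply_vector_with_matrix (A : List Int) (B : List (List Int)) (F_q : List Int) : Prop :=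
  A.length = B.length ∧ B ≠ [] ∧ (B.headD [] = [] ∨ F_q ≠ []) ∧ ∀ r ∈ B, (B.headD []).length ≤ r.length
instance (A : List Int) (B : List (List Int)) (F_q : List Int) : Decidable (Pre_multiply_vector_with_matrix A B F_q) := by unfold Pre_multiply_vector_with_matrix; infer_instance

def pvWitness_multiply_vector_with_matrix : List Int × List (List Int) × List Int :=
  ([1, 2], [[1, 0], [0, 1]], [0, 1, 2])

def Spec_multiply_vector_with_matrix (A : List Int) (B : List (List Int)) (F_q : List Int) (out : List Int) : Prop := out = multiply_vector_with_matrix_alt A B F_q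
instance (A : List Int) (B : List (List Int)) (F_q : List Int) (out : List Int) : Decidable (Spec_multiply_vector_with_matrix A B F_q out) := by unfold Spec_multiply_vector_with_matrix; infer_instance

-- ===== CLAIM (what is proved, stated in full; the proofs are below) =====
def Claim_equal_multiply_vector_with_matrix : Prop := ∀ (A : List Int) (B : List (List Int)) (F_q : List Int), Dom_multiply_vector_with_matrix A B F_q → Pre_multiply_vector_with_matrix A B F_q → Spec_multiply_vector_with_matrix A B F_q (multiply_vector_with_matrix A B F_q)

-- ===== LEMMAS AND PROOFS =====

-- dot A B j = sum over i of A[i] * B[i][j]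
def pvDot (A : List Int) (B : List (List Int)) (j : Nat) : Int :=
  ((List.range A.length).map (fun k => A.getD k 0 * (B.getD k []).getD j 0)).sum

theorem pvDot_nil (B : List (List Int)) (j : Nat) : pvDot [] B j = 0 := by
  simp [pvDot]

theorem pvDot_cons (a : Int) (as : List Int) (r : List Int) (rs : List (List Int)) (j : Nat) :
    pvDot (a :: as) (r :: rs) j = a * r.getD j 0 + pvDot as rs j := by
  simp [pvDot, List.range_succ_eq_map, List.map_map, Function.comp_def, List.getElem?_cons_succ]

theorem pv_bfold (n : Nat) :
    ∀ (A : List Int) (B : List (List Int)) (acc : List Int),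
      acc.length = n → A.length = B.length → (∀ r ∈ B, n ≤ r.length) →
      (A.zip B).foldl (fun acc p => (acc.zip p.2).map (fun q => q.1 + p.1 * q.2)) acc
        = (List.range n).map (fun j => acc.getD j 0 + pvDot A B j) := by
  intro A
  induction A with
  | nil =>
    intro B acc hacc _ _
    subst hacc
    simp only [List.zip_nil_left, List.foldl_nil, pvDot_nil, add_zero]
    apply List.ext_getElem
    · simp
    · intro i h1 h2
      simp [List.getD_eq_getElem?_getD, List.getElem?_eq_getElem h1]
  | cons a as ih =>
    intro B acc hacc hlen hrows
    cases B with
    | nil => simp at hlen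
    | cons r rs =>
      have hrn : n ≤ r.length := hrows r (by simp)
      have hzl : ((acc.zip r).map (fun q : Int × Int => q.1 + a * q.2)).length = n := by
        simp [List.length_zip]; omega
      rw [List.zip_cons_cons, List.foldl_cons,
          ih rs _ hzl (by simpa using hlen) (fun s hs => hrows s (by simp [hs]))]
      apply List.map_congr_left
      intro j hj
      rw [List.mem_range] at hj
      have hj1 : j < (acc.zip r).length := by simp [List.length_zip]; omega
      have : ((acc.zip r).map (fun q : Int × Int => q.1 + a * q.2)).getD j 0
          = acc.getD j 0 + a * r.getD j 0 := by
        rw [List.getD_eq_getElem?_getD, List.getElem?_map, List.getElem?_eq_getElem hj1]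
        simp [List.getElem_zip, List.getD_eq_getElem?_getD,
              List.getElem?_eq_getElem (show j < acc.length by omega),
              List.getElem?_eq_getElem (show j < r.length by omega)]
      rw [this, pvDot_cons]
      ring

-- A's inner loop from start s adds the dot product.
theorem pv_afold_inner (A : List Int) (B : List (List Int)) (j : Nat) (s : Int) :
    (PySem.List.pyRange 0 (A.length : Int) 1).foldl
      (fun acc i => acc + PySem.List.pyGetD A i 0 * PySem.List.pyGetD (PySem.List.pyGetD B i []) (j : Int) 0) s
      = s + pvDot A B j := by
  rw [PySem.List.pyRange_zero_natCast, List.foldl_map]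
  simp only [PySem.List.pyGetD_natCast]
  rw [PySem.List.foldl_add]
  simp [pvDot]

-- A's outer loop over the first k column indices.
theorem pv_afold_outer (A : List Int) (B : List (List Int)) (q : Int) (n : Nat) :
    ∀ k, k ≤ n →
    (List.range k).foldl
      (fun res (j : Nat) =>
        res.set j (PySem.Int.mod (res.getD j 0 + pvDot A B j) q))
      (List.replicate n (0 : Int))
      = (List.range n).map (fun j => if j < k then PySem.Int.mod (pvDot A B j) q else 0) := by
  intro k
  induction k with
  | zero =>
    intro _
    apply List.ext_getElem
    · simp
    · intro i h1 h2; simp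
  | succ k ih =>
    intro hk
    have hkn : k < n := hk
    rw [List.range_succ, List.foldl_append, ih (by omega)]
    have hget : ((List.range n).map (fun j => if j < k then PySem.Int.mod (pvDot A B j) q else 0)).getD k 0 = 0 := by
      rw [List.getD_eq_getElem?_getD, List.getElem?_map,
          List.getElem?_eq_getElem (by simpa using hkn)]
      simp
    simp only [List.foldl_cons, List.foldl_nil, hget, zero_add]
    apply List.ext_getElem
    · simp
    · intro i h1 h2
      simp only [List.length_set, List.length_map, List.length_range] at h1
      rw [List.getElem_set]
      by_cases hik : k = i
      · subst hik
        simp [List.getElem_map, List.getElem_range]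
      · simp only [if_neg hik]
        rw [List.getElem_map, List.getElem_map]
        simp only [List.getElem_range]
        have hiff : i < k ↔ i < k + 1 := by omega
        simp [hiff]

theorem multiply_vector_with_matrix_spec : Claim_equal_multiply_vector_with_matrix := by
  intro A B F_q _ hpre
  obtain ⟨hlen, hB, hF, hrows⟩ := hpre
  unfold Spec_multiply_vector_with_matrix multiply_vector_with_matrix multiply_vector_with_matrix_alt
  have hne : ¬(A.length ≠ B.length) := by simp [hlen]
  rw [if_neg hne, if_neg hne]
  dsimp only
  rw [pv_bfold (B.headD []).length A B _ (by simp) hlen hrows]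
  rw [PySem.List.pyRange_zero_natCast ((B.headD []).length), List.foldl_map]
  simp only [pv_afold_inner A B]
  simp only [PySem.List.pySetD_natCast, PySem.List.pyGetD_natCast]
  rw [pv_afold_outer A B (F_q.length : Int) (B.headD []).length (B.headD []).length le_rfl]
  rw [List.map_map]
  apply List.map_congr_left
  intro j hj
  rw [List.mem_range] at hj
  have hrep : (List.replicate (B.headD []).length (0 : Int)).getD j 0 = 0 := by
    rw [List.getD_eq_getElem?_getD, List.getElem?_replicate, if_pos hj]
    rfl
  simp only [Function.comp_apply]
  rw [if_pos hj, hrep, zero_add]
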